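-- pv_equiv track=rewrite | github.com/CZboop/Challenges-and-Interview-Question-Practice | codewars/python/Coding Meetup #14 - Higher-Order Functions Series - Order the food.py | order_food
-- ===== SOURCE A (Python) =====
-- def order_food(lst):
--     vegan = 0
--     vegetarian = 0
--     standard = 0
--     gluten_intolerant = 0
--     diabetic = 0
--     for i in lst:
--         if i.get("meal")=="vegan":
--             vegan+=1
--         elif i.get("meal")=="vegetarian":
--             vegetarian+=1
--         elif i.get("meal")=="standard":
--             standard+=1
--         elif i.get("meal")=="gluten-intolerant":
--             gluten_intolerant+=1
--         elif i.get("meal")=="diabetic":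
--             diabetic+=1
--     d = {"vegetarian":vegetarian, "standard": standard, "vegan": vegan, "gluten-intolerant":gluten_intolerant, "diabetic":diabetic}
--     return {k:v for (k,v) in d.items() if v!=0}
-- ===== SOURCE B (Python) =====
-- def order_food(lst):
--     order = ["vegetarian", "standard", "vegan", "gluten-intolerant", "diabetic"]
--     ranks = sorted(order.index(i.get("meal")) for i in lst if i.get("meal") in order)
--
--     def rle(xs):
--         if not xs:
--             return []
--         n = 1
--         while n < len(xs) and xs[n] == xs[0]:
--             n += 1
--         return [(order[xs[0]], n)] + rle(xs[n:])
--
--     return dict(rle(ranks))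
-- ===== Notes on version B (the rewrite author's own statement) =====
-- stated objective: alternative
-- what changed: Replaces the five-counter if/elif tally loop with a sort-then-scan algorithm: each known meal is mapped to its rank in the fixed key order, the rank list is sorted, and the result is produced by run-length-encoding the sorted runs (zero counts disappear automatically, order comes from the sort).
import Mathlib
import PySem

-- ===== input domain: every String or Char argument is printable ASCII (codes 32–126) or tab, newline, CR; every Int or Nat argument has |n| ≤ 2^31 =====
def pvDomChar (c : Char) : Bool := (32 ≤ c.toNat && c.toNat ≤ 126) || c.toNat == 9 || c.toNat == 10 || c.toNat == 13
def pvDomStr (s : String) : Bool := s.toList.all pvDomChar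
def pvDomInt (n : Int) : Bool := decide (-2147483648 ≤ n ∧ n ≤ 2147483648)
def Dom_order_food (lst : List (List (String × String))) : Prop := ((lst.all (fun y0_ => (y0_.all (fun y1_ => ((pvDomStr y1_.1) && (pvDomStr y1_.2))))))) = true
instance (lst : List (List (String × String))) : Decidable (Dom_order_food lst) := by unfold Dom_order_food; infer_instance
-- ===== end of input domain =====

-- B replaces the five-counter tally loop with sort-then-scan: map meals to ranks, sort, run-length-encode (alternative algorithm; no speed claim).

-- ===== PORT A =====
def order_food (lst : List (List (String × String))) : List (String × Int) :=
  let s := lst.foldl (fun (st : Int × Int × Int × Int × Int) i =>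
      if (PySem.Dict.mk i).get? "meal" = some "vegan" then
        (st.1 + 1, st.2.1, st.2.2.1, st.2.2.2.1, st.2.2.2.2)
      else if (PySem.Dict.mk i).get? "meal" = some "vegetarian" then
        (st.1, st.2.1 + 1, st.2.2.1, st.2.2.2.1, st.2.2.2.2)
      else if (PySem.Dict.mk i).get? "meal" = some "standard" then
        (st.1, st.2.1, st.2.2.1 + 1, st.2.2.2.1, st.2.2.2.2)
      else if (PySem.Dict.mk i).get? "meal" = some "gluten-intolerant" then
        (st.1, st.2.1, st.2.2.1, st.2.2.2.1 + 1, st.2.2.2.2)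
      else if (PySem.Dict.mk i).get? "meal" = some "diabetic" then
        (st.1, st.2.1, st.2.2.1, st.2.2.2.1, st.2.2.2.2 + 1)
      else st)
    (0, 0, 0, 0, 0)
  [("vegetarian", s.2.1), ("standard", s.2.2.1), ("vegan", s.1),
   ("gluten-intolerant", s.2.2.2.1), ("diabetic", s.2.2.2.2)].filter (fun kv => decide (kv.2 ≠ 0))

-- ===== PORT B =====
-- the fixed key order of Source B
def pvOrder : List String := ["vegetarian", "standard", "vegan", "gluten-intolerant", "diabetic"]

-- Source B's rle: the inner while loop computes the length n of the run of xs[0]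
-- (= 1 + length of the equal prefix of the tail, exact), and xs[n:] is that tail
-- with the equal prefix dropped (exact).
def pvRle (xs : List Nat) : List (String × Int) :=
  match xs with
  | [] => []
  | x :: t =>
    [(pvOrder.getD x "", ((t.takeWhile (fun y => y == x)).length + 1 : Int))] ++
      pvRle (t.dropWhile (fun y => y == x))
termination_by xs.length
decreasing_by
  simpa using Nat.lt_succ_of_le (List.length_dropWhile_le _ _)

-- 'order.index(m)' is ported as index? with getD 0 (the generator's filter guarantees
-- m ∈ order, so index? is always some); 'dict(pairs)' is the insert loop over the pairs.
def order_food_alt (lst : List (List (String × String))) : List (String × Int) :=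
  let ranks := PySem.List.sorted
    ((lst.filter (fun i => ((PySem.Dict.mk i).get? "meal").any (fun m => pvOrder.contains m))).map
      (fun i => (PySem.List.index? pvOrder (((PySem.Dict.mk i).get? "meal").getD "")).getD 0))
    (fun x => x) false
  ((pvRle ranks).foldl (fun d kv => d.insert kv.1 kv.2) PySem.Dict.empty).items

-- ===== PRECONDITION & SPEC =====
def Spec_order_food (lst : List (List (String × String))) (out : List (String × Int)) : Prop := out = order_food_alt lst
instance (lst : List (List (String × String))) (out : List (String × Int)) : Decidable (Spec_order_food lst out) := by unfold Spec_order_food; infer_instance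

-- ===== CLAIM (what is proved, stated in full; the proofs are below) =====
def Claim_equal_order_food : Prop := ∀ (lst : List (List (String × String))), Dom_order_food lst → Spec_order_food lst (order_food lst)

-- ===== LEMMAS AND PROOFS =====

-- A's loop leaves each counter equal to its start plus the number of rows whose "meal" is that key.
set_option maxHeartbeats 1600000 in
theorem order_food_loop (lst : List (List (String × String))) (a b c d e : Int) :
    lst.foldl (fun (st : Int × Int × Int × Int × Int) i =>
      if (PySem.Dict.mk i).get? "meal" = some "vegan" then
        (st.1 + 1, st.2.1, st.2.2.1, st.2.2.2.1, st.2.2.2.2)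
      else if (PySem.Dict.mk i).get? "meal" = some "vegetarian" then
        (st.1, st.2.1 + 1, st.2.2.1, st.2.2.2.1, st.2.2.2.2)
      else if (PySem.Dict.mk i).get? "meal" = some "standard" then
        (st.1, st.2.1, st.2.2.1 + 1, st.2.2.2.1, st.2.2.2.2)
      else if (PySem.Dict.mk i).get? "meal" = some "gluten-intolerant" then
        (st.1, st.2.1, st.2.2.1, st.2.2.2.1 + 1, st.2.2.2.2)
      else if (PySem.Dict.mk i).get? "meal" = some "diabetic" then
        (st.1, st.2.1, st.2.2.1, st.2.2.2.1, st.2.2.2.2 + 1)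
      else st) (a, b, c, d, e) =
    (a + ((lst.map (fun i => (PySem.Dict.mk i).get? "meal")).count (some "vegan") : Int),
     b + ((lst.map (fun i => (PySem.Dict.mk i).get? "meal")).count (some "vegetarian") : Int),
     c + ((lst.map (fun i => (PySem.Dict.mk i).get? "meal")).count (some "standard") : Int),
     d + ((lst.map (fun i => (PySem.Dict.mk i).get? "meal")).count (some "gluten-intolerant") : Int),
     e + ((lst.map (fun i => (PySem.Dict.mk i).get? "meal")).count (some "diabetic") : Int)) := by
  induction lst generalizing a b c d e with
  | nil => simp
  | cons x xs ih =>
    simp only [List.foldl_cons, List.map_cons, List.count_cons]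
    split_ifs <;> rw [ih] <;> clear ih <;>
      simp_all [Prod.ext_iff, beq_iff_eq] <;> omega

-- blocks: concatenation of constant runs
def pvBlocks (bs : List (Nat × Nat)) : List Nat := (bs.map (fun b => List.replicate b.2 b.1)).flatten

theorem mem_pvBlocks {y : Nat} {bs : List (Nat × Nat)} (h : y ∈ pvBlocks bs) :
    ∃ b ∈ bs, y = b.1 := by
  simp only [pvBlocks, List.mem_flatten, List.mem_map] at h
  obtain ⟨l, ⟨b, hb, rfl⟩, hy⟩ := h
  exact ⟨b, hb, (List.eq_of_mem_replicate hy)⟩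

-- a maximal run at the front: takeWhile/dropWhile split it off exactly
theorem run_split (p : Nat → Bool) (m : Nat) (x : Nat) (rest : List Nat)
    (hx : p x = true) (hr : ∀ y ∈ rest, p y = false) :
    (List.replicate m x ++ rest).takeWhile p = List.replicate m x ∧
    (List.replicate m x ++ rest).dropWhile p = rest := by
  induction m with
  | zero =>
    simp only [List.replicate_zero, List.nil_append]
    cases rest with
    | nil => simp
    | cons r t =>
      have := hr r (by simp)
      simp [List.takeWhile_cons, List.dropWhile_cons, this]
  | succ n ih =>
    simp [List.replicate_succ, List.takeWhile_cons, List.dropWhile_cons, hx, ih.1, ih.2]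

-- run-length encoding of strictly rank-increasing blocks = the nonzero blocks, projected
theorem pvRle_blocks (bs : List (Nat × Nat)) (h : bs.Pairwise (fun a b => a.1 < b.1)) :
    pvRle (pvBlocks bs) =
      (bs.filter (fun b => decide (b.2 ≠ 0))).map (fun b => (pvOrder.getD b.1 "", (b.2 : Int))) := by
  induction bs with
  | nil => simp [pvBlocks, pvRle]
  | cons b bs ih =>
    obtain ⟨r, c⟩ := b
    have hlt : ∀ y ∈ pvBlocks bs, r < y := by
      intro y hy
      obtain ⟨b', hb', rfl⟩ := mem_pvBlocks hy
      exact (List.pairwise_cons.mp h).1 b' hb'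
    have htail := ih (List.pairwise_cons.mp h).2
    cases c with
    | zero =>
      simpa [pvBlocks, List.filter_cons] using htail
    | succ m =>
      have hsplit := run_split (fun y => y == r) m r (pvBlocks bs) (by simp)
        (fun y hy => by simpa using Nat.ne_of_gt (hlt y hy))
      have hb : pvBlocks ((r, m + 1) :: bs) = r :: (List.replicate m r ++ pvBlocks bs) := by
        simp [pvBlocks, List.replicate_succ]
      rw [hb, pvRle, hsplit.1, hsplit.2, htail]
      simp [List.filter_cons]

-- inserting an element into the middle of nested appends, as permutation
theorem perm_mid1 (A C : List Nat) (a : Nat) : (A ++ a :: C).Perm (a :: (A ++ C)) :=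
  List.perm_middle
theorem perm_mid2 (A B C : List Nat) (a : Nat) :
    (A ++ (B ++ a :: C)).Perm (a :: (A ++ (B ++ C))) := by
  simpa [List.append_assoc] using (List.perm_middle (l₁ := A ++ B) (l₂ := C) (a := a))
theorem perm_mid3 (A B C D : List Nat) (a : Nat) :
    (A ++ (B ++ (C ++ a :: D))).Perm (a :: (A ++ (B ++ (C ++ D)))) := by
  simpa [List.append_assoc] using (List.perm_middle (l₁ := A ++ B ++ C) (l₂ := D) (a := a))
theorem perm_mid4 (A B C D E : List Nat) (a : Nat) :
    (A ++ (B ++ (C ++ (D ++ a :: E)))).Perm (a :: (A ++ (B ++ (C ++ (D ++ E))))) := by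
  simpa [List.append_assoc] using (List.perm_middle (l₁ := A ++ B ++ C ++ D) (l₂ := E) (a := a))

-- the multiset of ranks = one block per key, with the key's count
theorem ranks_perm (ms : List (Option String)) :
    ((ms.filter (fun m => m.any (fun s => pvOrder.contains s))).map
        (fun m => (PySem.List.index? pvOrder (m.getD "")).getD 0)).Perm
      (pvBlocks [(0, ms.count (some "vegetarian")), (1, ms.count (some "standard")),
                 (2, ms.count (some "vegan")), (3, ms.count (some "gluten-intolerant")),
                 (4, ms.count (some "diabetic"))]) := by
  induction ms with
  | nil => simp [pvBlocks]
  | cons m ms ih =>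
    by_cases h1 : m = some "vegetarian"
    · subst h1
      simp [pvBlocks, pvOrder, PySem.List.index?, List.filter_cons, List.count_cons,
        List.replicate_succ] at ih ⊢
      exact ih.cons 0
    · by_cases h2 : m = some "standard"
      · subst h2
        simp [pvBlocks, pvOrder, PySem.List.index?, List.filter_cons, List.count_cons,
          List.replicate_succ] at ih ⊢
        exact (ih.cons 1).trans (perm_mid1 _ _ 1).symm
      · by_cases h3 : m = some "vegan"
        · subst h3
          simp [pvBlocks, pvOrder, PySem.List.index?, List.filter_cons, List.count_cons,
            List.replicate_succ] at ih ⊢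
          exact (ih.cons 2).trans (perm_mid2 _ _ _ 2).symm
        · by_cases h4 : m = some "gluten-intolerant"
          · subst h4
            simp [pvBlocks, pvOrder, PySem.List.index?, List.filter_cons, List.count_cons,
              List.replicate_succ] at ih ⊢
            exact (ih.cons 3).trans (perm_mid3 _ _ _ _ 3).symm
          · by_cases h5 : m = some "diabetic"
            · subst h5
              simp [pvBlocks, pvOrder, PySem.List.index?, List.filter_cons, List.count_cons,
                List.replicate_succ] at ih ⊢
              exact (ih.cons 4).trans (perm_mid4 _ _ _ _ _ 4).symm
            · have hfilt : (m.any (fun s => pvOrder.contains s)) = false := by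
                cases m with
                | none => rfl
                | some s =>
                  simp only [Option.any_some, pvOrder, List.contains_eq_mem]
                  simp_all
              simp only [List.filter_cons, hfilt, List.count_cons]
              have e1 : (m == some "vegetarian") = false := by simp [h1]
              have e2 : (m == some "standard") = false := by simp [h2]
              have e3 : (m == some "vegan") = false := by simp [h3]
              have e4 : (m == some "gluten-intolerant") = false := by simp [h4]
              have e5 : (m == some "diabetic") = false := by simp [h5]
              simpa [e1, e2, e3, e4, e5] using ih

-- the sorted-run list is non-decreasing
theorem blocks_pairwise (c0 c1 c2 c3 c4 : Nat) :
    (pvBlocks [(0, c0), (1, c1), (2, c2), (3, c3), (4, c4)]).Pairwise (· ≤ ·) := by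
  simp only [pvBlocks, List.map_cons, List.map_nil, List.flatten_cons, List.flatten_nil,
    List.append_nil]
  simp [List.pairwise_append, List.mem_replicate, List.pairwise_replicate]
  constructor
  · rintro _ b (⟨_, rfl⟩ | ⟨_, rfl⟩) <;> norm_num
  · rintro _ b (⟨_, rfl⟩ | ⟨_, rfl⟩ | ⟨_, rfl⟩) <;> norm_num

-- the filtered literal table = the nonzero blocks, projected
set_option maxHeartbeats 1600000 in
theorem table_filter (c0 c1 c2 c3 c4 : Nat) :
    [("vegetarian", (c0 : Int)), ("standard", (c1 : Int)), ("vegan", (c2 : Int)),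
     ("gluten-intolerant", (c3 : Int)), ("diabetic", (c4 : Int))].filter
        (fun kv => decide (kv.2 ≠ 0)) =
      (([(0, c0), (1, c1), (2, c2), (3, c3), (4, c4)] : List (Nat × Nat)).filter
          (fun b => decide (b.2 ≠ 0))).map (fun b => (pvOrder.getD b.1 "", (b.2 : Int))) := by
  simp only [List.filter_cons, List.filter_nil, decide_not]
  by_cases h0 : c0 = 0 <;> by_cases h1 : c1 = 0 <;> by_cases h2 : c2 = 0 <;>
    by_cases h3 : c3 = 0 <;> by_cases h4 : c4 = 0 <;>
    simp [h0, h1, h2, h3, h4, pvOrder]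

-- ===== VERDICT (by name: the statement is the Claim_ definition above) =====
set_option maxHeartbeats 1600000 in
theorem order_food_spec : Claim_equal_order_food := by
  intro lst _
  show order_food lst = order_food_alt lst
  unfold order_food order_food_alt
  rw [order_food_loop]
  simp only [zero_add]
  -- rewrite B's ranks as a computation over the extracted meal list
  have hms : ((lst.filter (fun i => ((PySem.Dict.mk i).get? "meal").any (fun m => pvOrder.contains m))).map
      (fun i => (PySem.List.index? pvOrder (((PySem.Dict.mk i).get? "meal").getD "")).getD 0)) =
      (((lst.map (fun i => (PySem.Dict.mk i).get? "meal")).filter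
          (fun m => m.any (fun s => pvOrder.contains s))).map
        (fun m => (PySem.List.index? pvOrder (m.getD "")).getD 0)) := by
    rw [List.filter_map, List.map_map]
    rfl
  rw [hms]
  set ms := lst.map (fun i => (PySem.Dict.mk i).get? "meal") with hmsdef
  set bs : List (Nat × Nat) := [(0, ms.count (some "vegetarian")), (1, ms.count (some "standard")),
      (2, ms.count (some "vegan")), (3, ms.count (some "gluten-intolerant")),
      (4, ms.count (some "diabetic"))] with hbs
  have hsorted : PySem.List.sorted
      ((ms.filter (fun m => m.any (fun s => pvOrder.contains s))).map
        (fun m => (PySem.List.index? pvOrder (m.getD "")).getD 0)) (fun x => x) false =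
      pvBlocks bs :=
    PySem.List.sorted_id_eq_of_perm_of_pairwise _ _ (ranks_perm ms).symm
      (blocks_pairwise _ _ _ _ _)
  rw [hsorted]
  have hrle := pvRle_blocks bs (by simp [hbs])
  rw [hrle]
  -- the dict built from distinct fresh keys keeps exactly its pairs
  have hkeys : (((bs.filter (fun b => decide (b.2 ≠ 0))).map
      (fun b => (pvOrder.getD b.1 "", (b.2 : Int)))).map (fun p => p.1)).Nodup := by
    rw [List.map_map]
    have hsub : ((bs.filter (fun b => decide (b.2 ≠ 0))).map ((fun p => p.1) ∘ fun b => (pvOrder.getD b.1 "", (b.2 : Int)))).Sublist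
        (bs.map ((fun p => p.1) ∘ fun b => (pvOrder.getD b.1 "", (b.2 : Int)))) :=
      List.Sublist.map _ List.filter_sublist
    refine List.Nodup.sublist hsub ?_
    simp [hbs, pvOrder]
  have hitems := PySem.Dict.items_foldl_insert_fresh
    (l := (bs.filter (fun b => decide (b.2 ≠ 0))).map (fun b => (pvOrder.getD b.1 "", (b.2 : Int))))
    (k := fun p => p.1) (v := fun p => p.2) (d := PySem.Dict.empty)
    (by intro a _; simp [PySem.Dict.contains_empty]) hkeys
  simp only [hitems]
  simpa [hbs] using table_filter (ms.count (some "vegetarian")) (ms.count (some "standard"))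
    (ms.count (some "vegan")) (ms.count (some "gluten-intolerant")) (ms.count (some "diabetic"))
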